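-- pv_equiv track=rewrite | github.com/avdes96/advent_of_code | 2015/day_08/solution.py | get_memory_length
-- ===== SOURCE A (Python) =====
-- def get_memory_length(line: str) -> int:
--     memory_length, idx = 0, 0
--     while idx < len(line):
--         char = line[idx]
--         if char != '"':
--             memory_length += 1
--             if char == '\\':
--                 if line[idx+1] == 'x':
--                     idx += 4
--                 else:
--                     idx += 2
--             else:
--                 idx += 1
--         else:
--             idx += 1
--     return memory_length
-- ===== SOURCE B (Python) =====
-- def get_memory_length(line: str) -> int:
--     # One-pass character state machine (no index arithmetic, no lookahead).
--     NORMAL, ESC, HEX1, HEX2 = 0, 1, 2, 3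
--     count = 0
--     state = NORMAL
--     for ch in line:
--         if state == NORMAL:
--             if ch == '\\':
--                 count += 1
--                 state = ESC
--             elif ch != '"':
--                 count += 1
--         elif state == ESC:
--             state = HEX1 if ch == 'x' else NORMAL
--         elif state == HEX1:
--             state = HEX2
--         else:
--             state = NORMAL
--     return count
-- ===== Notes on version B (the rewrite author's own statement) =====
-- stated objective: simpler
-- what changed: Replaced the variable-stride index while-loop (idx += 1/2/4 with lookahead line[idx+1]) by a single uniform left-to-right pass driven by a 4-state escape automaton (NORMAL/ESC/HEX1/HEX2) with no index arithmetic and no lookahead.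
import Mathlib
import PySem

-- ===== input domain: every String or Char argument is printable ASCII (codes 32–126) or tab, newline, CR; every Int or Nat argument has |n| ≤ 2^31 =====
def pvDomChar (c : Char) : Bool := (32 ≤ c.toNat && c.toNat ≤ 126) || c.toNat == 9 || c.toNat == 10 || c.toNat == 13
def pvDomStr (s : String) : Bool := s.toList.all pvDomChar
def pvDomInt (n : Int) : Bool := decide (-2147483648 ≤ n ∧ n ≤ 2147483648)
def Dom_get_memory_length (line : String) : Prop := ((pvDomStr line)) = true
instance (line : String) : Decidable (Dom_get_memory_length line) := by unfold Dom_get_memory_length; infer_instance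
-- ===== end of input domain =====

-- B replaces A's variable-stride index loop by a single fold with a 4-state escape
-- automaton (simpler: no index arithmetic, no lookahead); return values only.

-- ===== PORT A =====
-- A's while loop, recursion on the remaining length; line[idx+1] out of range is
-- Python's IndexError (excluded by Pre_); the `none` branch's value is arbitrary.
def get_memory_length_go (l : List Char) (idx : Nat) (mem : Int) : Int :=
  if h : idx < l.length then
    let char := l[idx]
    if char ≠ '"' then
      if char = '\\' then
        match l[idx+1]? with
        | none => mem + 1            -- Python raises IndexError here (outside Pre_)
        | some c =>
          if c = 'x' then get_memory_length_go l (idx+4) (mem+1)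
          else get_memory_length_go l (idx+2) (mem+1)
      else get_memory_length_go l (idx+1) (mem+1)
    else get_memory_length_go l (idx+1) mem
  else mem
termination_by l.length - idx
decreasing_by all_goals omega

def get_memory_length (line : String) : Int :=
  get_memory_length_go line.toList 0 0

-- ===== PORT B =====
-- states: 0 = NORMAL, 1 = ESC, 2 = HEX1, 3 = HEX2
def get_memory_length_step (st : Nat × Int) (ch : Char) : Nat × Int :=
  if st.1 = 0 then
    if ch = '\\' then (1, st.2 + 1)
    else if ch ≠ '"' then (0, st.2 + 1)
    else (0, st.2)
  else if st.1 = 1 then (if ch = 'x' then 2 else 0, st.2)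
  else if st.1 = 2 then (3, st.2)
  else (0, st.2)

def get_memory_length_alt (line : String) : Int :=
  (line.toList.foldl get_memory_length_step (0, 0)).2

-- ===== PRECONDITION & SPEC =====
-- A raises IndexError exactly when its scan reaches a backslash with no character
-- after it (a lone trailing escape-start); Pre_ excludes those inputs.
def pvBadTail : List Char → Bool
  | [] => false
  | '\\' :: [] => true
  | '\\' :: 'x' :: _ :: _ :: r => pvBadTail r
  | '\\' :: 'x' :: _ => false
  | '\\' :: _ :: r => pvBadTail r
  | _ :: r => pvBadTail r

def Pre_get_memory_length (line : String) : Prop := pvBadTail line.toList = false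
instance (line : String) : Decidable (Pre_get_memory_length line) := by
  unfold Pre_get_memory_length; infer_instance

def pvWitness_get_memory_length : String := "ab\\x27\\\\c\"d"

def Spec_get_memory_length (line : String) (out : Int) : Prop := out = get_memory_length_alt line
instance (line : String) (out : Int) : Decidable (Spec_get_memory_length line out) := by unfold Spec_get_memory_length; infer_instance

-- ===== CLAIM (what is proved, stated in full; the proofs are below) =====
def Claim_equal_get_memory_length : Prop := ∀ (line : String), Dom_get_memory_length line → Pre_get_memory_length line → Spec_get_memory_length line (get_memory_length line)

-- ===== LEMMAS AND PROOFS =====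

-- A's loop, rephrased as recursion on the unscanned suffix of the character list.
def pvGoList : List Char → Int → Int
  | [], m => m
  | c :: r, m =>
    if c = '"' then pvGoList r m
    else if c = '\\' then
      match r with
      | [] => m + 1
      | c2 :: r2 => if c2 = 'x' then pvGoList (r2.drop 2) (m + 1) else pvGoList r2 (m + 1)
    else pvGoList r (m + 1)
termination_by l _ => l.length
decreasing_by all_goals (simp_all; try omega)

-- unfolding lemmas for pvGoList
theorem pvGoList_nil (m : Int) : pvGoList [] m = m := by rw [pvGoList.eq_def]

theorem pvGoList_quote (r : List Char) (m : Int) : pvGoList ('"' :: r) m = pvGoList r m := by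
  rw [pvGoList.eq_def]; simp

theorem pvGoList_esc_nil (m : Int) : pvGoList ['\\'] m = m + 1 := by
  rw [pvGoList.eq_def]; simp

theorem pvGoList_esc_x (r2 : List Char) (m : Int) :
    pvGoList ('\\' :: 'x' :: r2) m = pvGoList (r2.drop 2) (m + 1) := by
  rw [pvGoList.eq_def]; simp

theorem pvGoList_esc (c2 : Char) (r2 : List Char) (m : Int) (h : c2 ≠ 'x') :
    pvGoList ('\\' :: c2 :: r2) m = pvGoList r2 (m + 1) := by
  rw [pvGoList.eq_def]; simp [h]

theorem pvGoList_plain (c : Char) (r : List Char) (m : Int) (h1 : c ≠ '"') (h2 : c ≠ '\\') :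
    pvGoList (c :: r) m = pvGoList r (m + 1) := by
  rw [pvGoList.eq_def]; simp [h1, h2]

-- unfolding lemmas for pvBadTail
theorem pvBadTail_esc_nil : pvBadTail ['\\'] = true := rfl

theorem pvBadTail_esc_x (r2 : List Char) :
    pvBadTail ('\\' :: 'x' :: r2) = pvBadTail (r2.drop 2) := by
  match r2 with
  | [] => rfl
  | [a] => rfl
  | a :: b :: r => rfl

theorem pvBadTail_esc (c2 : Char) (r2 : List Char) (h : c2 ≠ 'x') :
    pvBadTail ('\\' :: c2 :: r2) = pvBadTail r2 := by
  rw [pvBadTail.eq_def]; simp [h]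

theorem pvBadTail_plain (c : Char) (r : List Char) (h2 : c ≠ '\\') :
    pvBadTail (c :: r) = pvBadTail r := by
  rw [pvBadTail.eq_def]; simp [h2]

-- A's index loop equals the suffix recursion.
theorem pvGo_eq_goList (l : List Char) (idx : Nat) (m : Int) :
    get_memory_length_go l idx m = pvGoList (l.drop idx) m := by
  induction hn : l.length - idx using Nat.strong_induction_on generalizing idx m with
  | _ n ih =>
  rw [get_memory_length_go]
  by_cases h : idx < l.length
  · rw [dif_pos h]
    have hdrop : l.drop idx = l[idx] :: l.drop (idx+1) := List.drop_eq_getElem_cons h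
    show (if l[idx] ≠ '"' then _ else _) = _
    by_cases hq : l[idx] = '"'
    · rw [if_neg (by simp [hq]), hdrop, hq, pvGoList_quote,
        ih (l.length - (idx+1)) (by omega) (idx+1) m rfl]
    · rw [if_pos hq]
      by_cases hb : l[idx] = '\\'
      · rw [if_pos hb, hdrop, hb]
        cases hx : l[idx+1]? with
        | none =>
          have hnin : ¬ idx + 1 < l.length := by
            intro hc; rw [List.getElem?_eq_getElem hc] at hx; simp at hx
          show (m + 1 : Int) = pvGoList ('\\' :: l.drop (idx+1)) m
          rw [List.drop_eq_nil_of_le (by omega), pvGoList_esc_nil]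
        | some c =>
          have hlt : idx + 1 < l.length := by
            by_contra hc
            rw [List.getElem?_eq_none (by omega)] at hx; simp at hx
          have hc : l[idx+1] = c := by
            rw [List.getElem?_eq_getElem hlt] at hx; exact Option.some.inj hx
          have hdrop1 : l.drop (idx+1) = c :: l.drop (idx+2) := by
            have := List.drop_eq_getElem_cons hlt
            simpa [hc] using this
          rw [hdrop1]
          show (if c = 'x' then get_memory_length_go l (idx+4) (m+1)
                else get_memory_length_go l (idx+2) (m+1))
              = pvGoList ('\\' :: c :: l.drop (idx+2)) m
          by_cases hcx : c = 'x'
          · rw [if_pos hcx, hcx, pvGoList_esc_x,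
              ih (l.length - (idx+4)) (by omega) (idx+4) (m+1) rfl, List.drop_drop]
          · rw [if_neg hcx, pvGoList_esc _ _ _ hcx,
              ih (l.length - (idx+2)) (by omega) (idx+2) (m+1) rfl]
      · rw [if_neg hb, hdrop, pvGoList_plain _ _ _ hq hb,
          ih (l.length - (idx+1)) (by omega) (idx+1) (m+1) rfl]
  · rw [dif_neg h, List.drop_eq_nil_of_le (by omega), pvGoList_nil]

-- evaluation of B's step on literal states
theorem pvStep_hex1 (c : Int) (ch : Char) :
    get_memory_length_step (2, c) ch = (3, c) := by
  simp [get_memory_length_step]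

theorem pvStep_hex2 (c : Int) (ch : Char) :
    get_memory_length_step (3, c) ch = (0, c) := by
  simp [get_memory_length_step]

-- HEX1 then HEX2 consume two arbitrary characters without counting
theorem pvFold_hex (r : List Char) (c : Int) :
    (r.foldl get_memory_length_step (2, c)).2
      = ((r.drop 2).foldl get_memory_length_step (0, c)).2 := by
  match r with
  | [] => rfl
  | [a] => simp [pvStep_hex1]
  | a :: b :: r => simp [pvStep_hex1, pvStep_hex2]

-- the suffix recursion equals B's automaton fold, on good suffixes
theorem pvGoList_eq_fold (s : List Char) (h : pvBadTail s = false) (m : Int) :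
    pvGoList s m = (s.foldl get_memory_length_step (0, m)).2 := by
  induction hn : s.length using Nat.strong_induction_on generalizing s m with
  | _ n ih =>
  rcases s with _ | ⟨c, r⟩
  · rw [pvGoList_nil]; rfl
  · by_cases hb : c = '\\'
    · subst hb
      rcases r with _ | ⟨c2, r2⟩
      · rw [pvBadTail_esc_nil] at h; exact Bool.noConfusion h
      · by_cases hcx : c2 = 'x'
        · subst hcx
          rw [pvBadTail_esc_x] at h
          rw [pvGoList_esc_x, ih (r2.drop 2).length (by simp at hn ⊢; omega) _ h (m+1) rfl]
          simp only [List.foldl_cons]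
          have h1 : get_memory_length_step (0, m) '\\' = (1, m + 1) := by
            simp [get_memory_length_step]
          have h2 : get_memory_length_step (1, m + 1) 'x' = (2, m + 1) := by
            simp [get_memory_length_step]
          rw [h1, h2, pvFold_hex]
        · rw [pvBadTail_esc _ _ hcx] at h
          rw [pvGoList_esc _ _ _ hcx, ih r2.length (by simp at hn ⊢; omega) _ h (m+1) rfl]
          simp only [List.foldl_cons]
          have h1 : get_memory_length_step (0, m) '\\' = (1, m + 1) := by
            simp [get_memory_length_step]
          have h2 : get_memory_length_step (1, m + 1) c2 = (0, m + 1) := by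
            simp [get_memory_length_step, hcx]
          rw [h1, h2]
    · rw [pvBadTail_plain _ _ hb] at h
      by_cases hq : c = '"'
      · subst hq
        rw [pvGoList_quote, ih r.length (by simp at hn ⊢; omega) _ h m rfl]
        simp only [List.foldl_cons]
        have h1 : get_memory_length_step (0, m) '"' = (0, m) := by
          simp [get_memory_length_step]
        rw [h1]
      · rw [pvGoList_plain _ _ _ hq hb, ih r.length (by simp at hn ⊢; omega) _ h (m+1) rfl]
        simp only [List.foldl_cons]
        have h1 : get_memory_length_step (0, m) c = (0, m + 1) := by
          simp [get_memory_length_step, hq, hb]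
        rw [h1]

-- ===== VERDICT (by name: the statement is the Claim_ definition above) =====
theorem get_memory_length_spec : Claim_equal_get_memory_length := by
  intro line _ hpre
  unfold Spec_get_memory_length get_memory_length get_memory_length_alt
  rw [pvGo_eq_goList, List.drop_zero, pvGoList_eq_fold _ hpre]
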